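-- pv_equiv track=rewrite | github.com/pypi-data/pypi-mirror-346 | packages/sem-desc/sem_desc-6.19.2.tar.gz/sem_desc-6.19.2/sm/misc/funcs.py | auto_wrap
-- ===== SOURCE A (Python) =====
-- from typing import (
--     Any,
--     Callable,
--     Iterable,
--     KeysView,
--     Literal,
--     Mapping,
--     Optional,
--     Sequence,
--     Type,
--     TypeVar,
--     Union,
--     overload,
-- )
--
-- def auto_wrap(
--     word: str,
--     max_char_per_line: int,
--     delimiters: Optional[list[str]] = None,
--     camelcase_split: bool = True,
-- ) -> str:
--     """
--     Treat this as optimization problem, where we trying to minimize the number of line break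
--     but also maximize the readability in each line, i.e: maximize the number of characters in each lines
--
--     Using greedy search.
--     :param word:
--     :param max_char_per_line:
--     :param delimiters:
--     :return:
--     """
--     # split original word by the delimiters
--     if delimiters is None:
--         delimiters = [" ", ":", "_", "/"]
--
--     sublines: list[str] = [""]
--     for i, c in enumerate(word):
--         if c not in delimiters:
--             sublines[-1] += c
--
--             if (
--                 camelcase_split
--                 and not c.isupper()
--                 and i + 1 < len(word)
--                 and word[i + 1].isupper()
--             ):
--                 # camelcase_split
--                 sublines.append("")
--         else:
--             sublines[-1] += c
--             sublines.append("")
--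
--     new_sublines: list[str] = [""]
--     for line in sublines:
--         if len(new_sublines[-1]) + len(line) <= max_char_per_line:
--             new_sublines[-1] += line
--         else:
--             new_sublines.append(line)
--
--     return "\n".join(new_sublines)
-- ===== SOURCE B (Python) =====
-- def auto_wrap(
--     word: str,
--     max_char_per_line: int,
--     delimiters=None,
--     camelcase_split: bool = True,
-- ) -> str:
--     # Single fused pass: build each token and greedily pack it into the current
--     # line as soon as it is complete, instead of materialising the token list first.
--     if delimiters is None:
--         delimiters = [" ", ":", "_", "/"]
--
--     n = len(word)
--     lines: list[str] = []
--     line = ""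
--     tok = ""
--     for i, c in enumerate(word):
--         tok += c
--         if c in delimiters or (
--             camelcase_split
--             and not c.isupper()
--             and i + 1 < n
--             and word[i + 1].isupper()
--         ):
--             # token complete: pack it greedily
--             if len(line) + len(tok) <= max_char_per_line:
--                 line += tok
--             else:
--                 lines.append(line)
--                 line = tok
--             tok = ""
--     # flush the pending token and the current line
--     if len(line) + len(tok) <= max_char_per_line:
--         line += tok
--     else:
--         lines.append(line)
--         line = tok
--     lines.append(line)
--     return "\n".join(lines)
-- ===== Notes on version B (the rewrite author's own statement) =====
-- stated objective: alternative
-- what changed: Replaced A's two passes (build the full token list, then greedily pack it) with a single fused pass that greedily packs each token into the current line the moment the token is completed, never materialising the token list.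
import Mathlib
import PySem

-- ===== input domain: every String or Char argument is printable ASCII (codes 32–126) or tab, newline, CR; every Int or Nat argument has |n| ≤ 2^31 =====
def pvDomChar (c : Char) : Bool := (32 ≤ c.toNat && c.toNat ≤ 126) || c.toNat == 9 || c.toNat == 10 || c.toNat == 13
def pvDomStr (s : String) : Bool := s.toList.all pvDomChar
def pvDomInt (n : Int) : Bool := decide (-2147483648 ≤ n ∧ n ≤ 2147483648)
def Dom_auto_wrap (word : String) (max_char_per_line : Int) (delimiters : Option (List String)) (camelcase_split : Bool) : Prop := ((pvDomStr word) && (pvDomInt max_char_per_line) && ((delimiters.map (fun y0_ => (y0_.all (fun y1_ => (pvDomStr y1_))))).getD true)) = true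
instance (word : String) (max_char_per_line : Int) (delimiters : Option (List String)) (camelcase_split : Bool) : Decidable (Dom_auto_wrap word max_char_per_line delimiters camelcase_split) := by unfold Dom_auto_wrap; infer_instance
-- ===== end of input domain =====

-- B fuses A's two passes (tokenise, then greedily pack) into one pass that packs each
-- token the moment it is complete; objective: alternative decomposition, same cost.

-- ===== PORT A =====
-- shared character tests (both Pythons evaluate exactly these conditions)
def pvIsDelim (ds : List (List Char)) (c : Char) : Bool := ds.contains [c]
def pvIsCamel (camel : Bool) (chars : List Char) (i : Int) (c : Char) : Bool :=
  camel && !(PySem.Chars.isupper c) && decide (i + 1 < (chars.length : Int)) &&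
    PySem.Chars.isupper (PySem.List.pyGetD chars (i + 1) ' ')

-- `xs[-1] += s` on a Python list of strings (the list is always nonempty here)
def pvAddLast : List (List Char) → List Char → List (List Char)
  | [], s => [s]
  | [x], s => [x ++ s]
  | x :: y :: xs, s => x :: pvAddLast (y :: xs) s

-- body of A's first loop (split by delimiters / camelcase boundaries)
def pvAStep1 (ds : List (List Char)) (camel : Bool) (chars : List Char)
    (sub : List (List Char)) (ic : Int × Char) : List (List Char) :=
  if !(pvIsDelim ds ic.2) then
    let sub' := pvAddLast sub [ic.2]
    if pvIsCamel camel chars ic.1 ic.2 then sub' ++ [[]] else sub'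
  else pvAddLast sub [ic.2] ++ [[]]

-- body of A's second loop (greedy packing)
def pvAStep2 (mx : Int) (ns : List (List Char)) (line : List Char) : List (List Char) :=
  if ((ns.getLastD []).length : Int) + (line.length : Int) ≤ mx then pvAddLast ns line
  else ns ++ [line]

def auto_wrap (word : String) (max_char_per_line : Int) (delimiters : Option (List String)) (camelcase_split : Bool) : String :=
  let ds := (delimiters.getD [" ", ":", "_", "/"]).map String.toList
  let chars := word.toList
  let sublines := (PySem.List.enumerate chars 0).foldl (pvAStep1 ds camelcase_split chars) [[]]
  let new_sublines := sublines.foldl (pvAStep2 max_char_per_line) [[]]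
  String.ofList (PySem.Chars.join ['\n'] new_sublines)

-- ===== PORT B =====
-- greedy packing of one completed token into (finished lines, current line)
def pvPack (mx : Int) (st : List (List Char) × List Char) (tok : List Char) : List (List Char) × List Char :=
  if (st.2.length : Int) + (tok.length : Int) ≤ mx then (st.1, st.2 ++ tok)
  else (st.1 ++ [st.2], tok)

-- body of B's single loop; state = (finished lines, current line, current token)
def pvBStep (ds : List (List Char)) (camel : Bool) (chars : List Char) (mx : Int)
    (st : List (List Char) × List Char × List Char) (ic : Int × Char) :
    List (List Char) × List Char × List Char :=
  let tok := st.2.2 ++ [ic.2]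
  if pvIsDelim ds ic.2 || pvIsCamel camel chars ic.1 ic.2 then
    let p := pvPack mx (st.1, st.2.1) tok
    (p.1, p.2, [])
  else (st.1, st.2.1, tok)

def auto_wrap_alt (word : String) (max_char_per_line : Int) (delimiters : Option (List String)) (camelcase_split : Bool) : String :=
  let ds := (delimiters.getD [" ", ":", "_", "/"]).map String.toList
  let chars := word.toList
  let st := (PySem.List.enumerate chars 0).foldl
      (pvBStep ds camelcase_split chars max_char_per_line) ([], [], [])
  -- flush the pending token, then close the current line
  let p := pvPack max_char_per_line (st.1, st.2.1) st.2.2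
  String.ofList (PySem.Chars.join ['\n'] (p.1 ++ [p.2]))

-- ===== PRECONDITION & SPEC =====
def Spec_auto_wrap (word : String) (max_char_per_line : Int) (delimiters : Option (List String)) (camelcase_split : Bool) (out : String) : Prop := out = auto_wrap_alt word max_char_per_line delimiters camelcase_split
instance (word : String) (max_char_per_line : Int) (delimiters : Option (List String)) (camelcase_split : Bool) (out : String) : Decidable (Spec_auto_wrap word max_char_per_line delimiters camelcase_split out) := by unfold Spec_auto_wrap; infer_instance

-- ===== CLAIM (what is proved, stated in full; the proofs are below) =====
def Claim_equal_auto_wrap : Prop := ∀ (word : String) (max_char_per_line : Int) (delimiters : Option (List String)) (camelcase_split : Bool), Dom_auto_wrap word max_char_per_line delimiters camelcase_split → Spec_auto_wrap word max_char_per_line delimiters camelcase_split (auto_wrap word max_char_per_line delimiters camelcase_split)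

-- ===== LEMMAS AND PROOFS =====

-- the token stream of A's first pass, as a recursion over the enumerated chars
def pvToks (ds : List (List Char)) (camel : Bool) (chars : List Char) : List (Int × Char) → List Char → List (List Char)
  | [], tok => [tok]
  | ic :: es, tok =>
      if pvIsDelim ds ic.2 || pvIsCamel camel chars ic.1 ic.2 then
        (tok ++ [ic.2]) :: pvToks ds camel chars es []
      else pvToks ds camel chars es (tok ++ [ic.2])

theorem pvAddLast_concat (done : List (List Char)) (tok s : List Char) :
    pvAddLast (done ++ [tok]) s = done ++ [tok ++ s] := by
  induction done with
  | nil => rfl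
  | cons x xs ih =>
    cases xs with
    | nil => rfl
    | cons y ys =>
      simp only [List.cons_append, pvAddLast] at ih ⊢
      rw [ih]

theorem pvPass1_eq (ds : List (List Char)) (camel : Bool) (chars : List Char)
    (es : List (Int × Char)) (done : List (List Char)) (tok : List Char) :
    es.foldl (pvAStep1 ds camel chars) (done ++ [tok])
    = done ++ pvToks ds camel chars es tok := by
  induction es generalizing done tok with
  | nil => rfl
  | cons ic es ih =>
    simp only [List.foldl_cons, pvToks, pvAStep1]
    by_cases hd : pvIsDelim ds ic.2 = true
    · simp only [hd, Bool.true_or, if_true, Bool.not_true, Bool.false_eq_true, if_false,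
        pvAddLast_concat]
      have := ih (done ++ [tok ++ [ic.2]]) []
      simpa [List.append_assoc] using this
    · have hd' : pvIsDelim ds ic.2 = false := by simpa using hd
      by_cases hc : pvIsCamel camel chars ic.1 ic.2 = true
      · simp only [hd', hc, Bool.false_or, if_true, Bool.not_false, pvAddLast_concat]
        have := ih (done ++ [tok ++ [ic.2]]) []
        simpa [List.append_assoc] using this
      · have hc' : pvIsCamel camel chars ic.1 ic.2 = false := by simpa using hc
        simp only [hd', hc', Bool.false_or, Bool.false_eq_true, if_false, Bool.not_false,
          if_true, pvAddLast_concat]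
        exact ih done (tok ++ [ic.2])

theorem pvPack_eq (mx : Int) (ts : List (List Char)) (ls : List (List Char)) (l : List Char) :
    ts.foldl (pvAStep2 mx) (ls ++ [l])
    = (ts.foldl (pvPack mx) (ls, l)).1 ++ [(ts.foldl (pvPack mx) (ls, l)).2] := by
  induction ts generalizing ls l with
  | nil => rfl
  | cons t ts ih =>
    simp only [List.foldl_cons, pvAStep2, pvPack]
    by_cases h : (l.length : Int) + (t.length : Int) ≤ mx
    · rw [if_pos (by simpa using h), if_pos h, pvAddLast_concat]
      exact ih ls (l ++ t)
    · rw [if_neg (by simpa using h), if_neg h]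
      simpa [List.append_assoc] using ih (ls ++ [l]) t

theorem pvFuse_eq (ds : List (List Char)) (camel : Bool) (chars : List Char) (mx : Int)
    (es : List (Int × Char)) (ls : List (List Char)) (l tok : List Char) :
    pvPack mx ((es.foldl (pvBStep ds camel chars mx) (ls, l, tok)).1,
               (es.foldl (pvBStep ds camel chars mx) (ls, l, tok)).2.1)
      (es.foldl (pvBStep ds camel chars mx) (ls, l, tok)).2.2
    = (pvToks ds camel chars es tok).foldl (pvPack mx) (ls, l) := by
  induction es generalizing ls l tok with
  | nil => rfl
  | cons ic es ih =>
    simp only [List.foldl_cons, pvToks, pvBStep]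
    by_cases h : (pvIsDelim ds ic.2 || pvIsCamel camel chars ic.1 ic.2) = true
    · simp only [h, if_true, List.foldl_cons]
      exact ih (pvPack mx (ls, l) (tok ++ [ic.2])).1 (pvPack mx (ls, l) (tok ++ [ic.2])).2 []
    · simp only [h, Bool.false_eq_true, if_false]
      exact ih ls l (tok ++ [ic.2])

-- ===== VERDICT (by name: the statement is the Claim_ definition above) =====
theorem auto_wrap_spec : Claim_equal_auto_wrap := by
  intro word mx delims camel _
  simp only [Spec_auto_wrap, auto_wrap, auto_wrap_alt]
  have h1 := pvPass1_eq ((delims.getD [" ", ":", "_", "/"]).map String.toList) camel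
      word.toList (PySem.List.enumerate word.toList 0) [] []
  have h2 := pvPack_eq mx
      (pvToks ((delims.getD [" ", ":", "_", "/"]).map String.toList) camel word.toList
        (PySem.List.enumerate word.toList 0) []) [] []
  have h3 := pvFuse_eq ((delims.getD [" ", ":", "_", "/"]).map String.toList) camel
      word.toList mx (PySem.List.enumerate word.toList 0) [] [] []
  simp only [List.nil_append] at h1 h2 h3
  rw [h1, h2, ← h3]
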